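-- pv_equiv track=rewrite | github.com/grmarco/Spanish-Rhyme-Annotator | spanish_rhyme_annotator.py | analyze_rhyme_types
-- ===== SOURCE A (Python) =====
-- def analyze_rhyme_types(rhymes_info):
--     """
--     Analiza y cuenta los tipos de rima (consonante, asonante, mixta).
--     """
--     rhyme_types = {'consonante': 0, 'asonante': 0, 'mixta': 0}
--     for info in rhymes_info.values():
--        if info['tipo'] == 'consonante':
--           rhyme_types['consonante'] +=1
--        elif info['tipo'] == 'asonante':
--            rhyme_types['asonante'] += 1
--        elif info['tipo'] == 'mixta':
--            rhyme_types['mixta'] +=1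
--     return rhyme_types
-- ===== SOURCE B (Python) =====
-- def analyze_rhyme_types(rhymes_info):
--     """
--     Analiza y cuenta los tipos de rima (consonante, asonante, mixta).
--     """
--     vals = list(rhymes_info.values())
--     return {t: sum(1 for info in vals if info['tipo'] == t)
--             for t in ('consonante', 'asonante', 'mixta')}
-- ===== Notes on version B (the rewrite author's own statement) =====
-- stated objective: alternative
-- what changed: Replaces the single dispatching loop with an accumulator dict by three independent counting passes, one per rhyme type, assembled into the result dict by a comprehension over the fixed keys.
import Mathlib
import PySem

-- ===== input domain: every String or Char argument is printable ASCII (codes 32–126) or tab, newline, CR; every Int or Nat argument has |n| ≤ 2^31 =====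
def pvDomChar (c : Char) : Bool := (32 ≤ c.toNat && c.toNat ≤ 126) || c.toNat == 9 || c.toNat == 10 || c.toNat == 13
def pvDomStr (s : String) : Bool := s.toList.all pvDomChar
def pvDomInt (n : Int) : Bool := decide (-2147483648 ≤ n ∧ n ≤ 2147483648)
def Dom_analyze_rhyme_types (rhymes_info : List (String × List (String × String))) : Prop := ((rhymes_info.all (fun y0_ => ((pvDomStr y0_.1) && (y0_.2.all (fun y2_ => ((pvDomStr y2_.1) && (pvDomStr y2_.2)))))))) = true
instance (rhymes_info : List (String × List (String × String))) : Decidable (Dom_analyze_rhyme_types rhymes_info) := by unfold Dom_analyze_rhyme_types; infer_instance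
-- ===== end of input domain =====

-- B replaces A's single dispatching loop by three independent per-type counting passes (objective: alternative; same cost).

-- ===== PORT A =====
-- info['tipo'] on an association list: first match (none = KeyError, excluded by Pre_).
def pvLookupTipo (info : List (String × String)) : Option String :=
  (info.find? (fun q => q.1 == "tipo")).map (·.2)

def pvStepA (d : PySem.Dict String Int) (p : String × List (String × String)) : PySem.Dict String Int :=
  match pvLookupTipo p.2 with
  | some t =>
      if t = "consonante" then d.modify "consonante" 0 (· + 1)
      else if t = "asonante" then d.modify "asonante" 0 (· + 1)
      else if t = "mixta" then d.modify "mixta" 0 (· + 1)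
      else d
  | none => d

def analyze_rhyme_types (rhymes_info : List (String × List (String × String))) : List (String × Int) :=
  (rhymes_info.foldl pvStepA
    ((((PySem.Dict.empty : PySem.Dict String Int).insert "consonante" 0).insert "asonante" 0).insert "mixta" 0)).items

-- ===== PORT B =====
-- sum(1 for info in vals if info['tipo'] == t) = count of matching values.
def pvCountTipo (vals : List (List (String × String))) (t : String) : Int :=
  ((vals.map (fun info => if pvLookupTipo info == some t then (1 : Int) else 0)).sum)

def analyze_rhyme_types_alt (rhymes_info : List (String × List (String × String))) : List (String × Int) :=
  let vals := rhymes_info.map (·.2)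
  ["consonante", "asonante", "mixta"].map (fun t => (t, pvCountTipo vals t))

-- ===== PRECONDITION & SPEC =====
-- Pre_: every inner dict has the key 'tipo' (otherwise Python A raises KeyError).
def Pre_analyze_rhyme_types (rhymes_info : List (String × List (String × String))) : Prop :=
  (rhymes_info.all (fun p => p.2.any (fun q => q.1 == "tipo"))) = true
instance (rhymes_info : List (String × List (String × String))) : Decidable (Pre_analyze_rhyme_types rhymes_info) := by unfold Pre_analyze_rhyme_types; infer_instance

def pvWitness_analyze_rhyme_types : (List (String × List (String × String))) :=
  [("v1", [("tipo", "consonante")]), ("v2", [("tipo", "mixta")]), ("v3", [("tipo", "libre")])]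

def Spec_analyze_rhyme_types (rhymes_info : List (String × List (String × String))) (out : List (String × Int)) : Prop := out = analyze_rhyme_types_alt rhymes_info
instance (rhymes_info : List (String × List (String × String))) (out : List (String × Int)) : Decidable (Spec_analyze_rhyme_types rhymes_info out) := by unfold Spec_analyze_rhyme_types; infer_instance

-- ===== CLAIM (what is proved, stated in full; the proofs are below) =====
def Claim_equal_analyze_rhyme_types : Prop := ∀ (rhymes_info : List (String × List (String × String))), Dom_analyze_rhyme_types rhymes_info → Pre_analyze_rhyme_types rhymes_info → Spec_analyze_rhyme_types rhymes_info (analyze_rhyme_types rhymes_info)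

-- ===== LEMMAS AND PROOFS =====

lemma pvStepA_mk (p : String × List (String × String)) (c a m : Int) :
    pvStepA (PySem.Dict.mk [("consonante", c), ("asonante", a), ("mixta", m)]) p
    = PySem.Dict.mk
        [("consonante", c + (if pvLookupTipo p.2 == some "consonante" then 1 else 0)),
         ("asonante", a + (if pvLookupTipo p.2 == some "asonante" then 1 else 0)),
         ("mixta", m + (if pvLookupTipo p.2 == some "mixta" then 1 else 0))] := by
  unfold pvStepA
  cases h : pvLookupTipo p.2 with
  | none => simp
  | some t =>
      by_cases h1 : t = "consonante"
      · subst h1; simp [PySem.Dict.modify, PySem.Dict.contains, PySem.Dict.insert, PySem.Dict.getD_eq_get?_getD, PySem.Dict.get?_mk_cons]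
      · by_cases h2 : t = "asonante"
        · subst h2; simp [PySem.Dict.modify, PySem.Dict.contains, PySem.Dict.insert, PySem.Dict.getD_eq_get?_getD, PySem.Dict.get?_mk_cons]
        · by_cases h3 : t = "mixta"
          · subst h3; simp [PySem.Dict.modify, PySem.Dict.contains, PySem.Dict.insert, PySem.Dict.getD_eq_get?_getD, PySem.Dict.get?_mk_cons]
          · simp [h1, h2, h3]

lemma pvFoldA (ri : List (String × List (String × String))) (c a m : Int) :
    ri.foldl pvStepA (PySem.Dict.mk [("consonante", c), ("asonante", a), ("mixta", m)])
    = PySem.Dict.mk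
        [("consonante", c + pvCountTipo (ri.map (·.2)) "consonante"),
         ("asonante", a + pvCountTipo (ri.map (·.2)) "asonante"),
         ("mixta", m + pvCountTipo (ri.map (·.2)) "mixta")] := by
  induction ri generalizing c a m with
  | nil => simp [pvCountTipo]
  | cons p rest ih =>
      simp only [List.foldl_cons, pvStepA_mk, ih, List.map_cons, pvCountTipo, List.sum_cons]
      ring_nf

-- ===== VERDICT (by name: the statement is the Claim_ definition above) =====
theorem analyze_rhyme_types_spec : Claim_equal_analyze_rhyme_types := by
  intro ri _ _
  show analyze_rhyme_types ri = analyze_rhyme_types_alt ri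
  unfold analyze_rhyme_types analyze_rhyme_types_alt
  have h0 : ((((PySem.Dict.empty : PySem.Dict String Int).insert "consonante" 0).insert "asonante" 0).insert "mixta" 0)
      = PySem.Dict.mk [("consonante", 0), ("asonante", 0), ("mixta", 0)] := by decide
  rw [h0, pvFoldA]
  simp
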